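-- pv_equiv track=rewrite | github.com/WolfgangFahl/velorail | tests/test_rel2wiki.py | sanitize_variable_name
-- ===== SOURCE A (Python) =====
-- def sanitize_variable_name(prop):
--     """
--     Convert a prefixed prop into a valid SPARQL variable name.
--     """
--     parts = prop.split(":")
--     var_name = ""
--     if parts:
--         var_name=parts[-1]
--         for invalid in ["-",":","#"]:
--             var_name = var_name.replace(invalid, "_")
--     var_name=f"{var_name}"
--     return var_name
-- ===== SOURCE B (Python) =====
-- def sanitize_variable_name(prop):
--     """
--     Convert a prefixed prop into a valid SPARQL variable name.
--     """
--     out = []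
--     for ch in reversed(prop):
--         if ch == ':':
--             break
--         out.append('_' if ch == '-' or ch == '#' else ch)
--     out.reverse()
--     return ''.join(out)
-- ===== Notes on version B (the rewrite author's own statement) =====
-- stated objective: alternative
-- what changed: B never splits the string: it scans the characters once from the right, stopping at the first ':' seen from the end, mapping '-'/'#' to '_' as it goes, and reverses the collected suffix; A splits on ':' into a list of segments and then runs three whole-segment .replace passes.
import Mathlib
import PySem

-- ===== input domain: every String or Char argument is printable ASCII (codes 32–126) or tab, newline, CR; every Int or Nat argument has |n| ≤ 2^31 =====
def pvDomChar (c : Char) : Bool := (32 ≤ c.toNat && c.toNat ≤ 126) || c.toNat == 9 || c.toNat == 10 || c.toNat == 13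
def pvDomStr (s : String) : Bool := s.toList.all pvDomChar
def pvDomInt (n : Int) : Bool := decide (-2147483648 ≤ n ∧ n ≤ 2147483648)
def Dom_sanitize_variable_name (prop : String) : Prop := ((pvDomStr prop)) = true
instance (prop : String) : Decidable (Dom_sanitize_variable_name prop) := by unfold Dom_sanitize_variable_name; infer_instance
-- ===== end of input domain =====

-- B scans the characters once from the right, stopping at the first ':' seen from the end, instead of A's split on ':' followed by three .replace passes; same return value everywhere.

-- ===== PORT A =====
def sanitize_variable_name (prop : String) : String :=
  let parts := (PySem.Str.split? prop ":").getD []   -- sep ":" is non-empty, so split? never returns none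
  let var_name : String := ""
  let var_name :=
    if parts ≠ [] then
      ["-", ":", "#"].foldl (fun v inv => PySem.Str.replace v inv "_")
        ((PySem.List.pyGet? parts (-1)).getD "")     -- parts[-1]; parts is never empty
    else var_name
  var_name

-- ===== PORT B =====
-- Source B's loop over reversed(prop): collect chars (mapping '-'/'#' to '_'), break at the first ':'
def pvRevCollect : List Char → List Char → List Char
  | [], out => out
  | c :: rest, out =>
    if c = ':' then out
    else pvRevCollect rest (out ++ [if c = '-' ∨ c = '#' then '_' else c])

def sanitize_variable_name_alt (prop : String) : String :=
  String.ofList (pvRevCollect prop.toList.reverse []).reverse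

-- ===== PRECONDITION & SPEC =====
def Spec_sanitize_variable_name (prop : String) (out : String) : Prop := out = sanitize_variable_name_alt prop
instance (prop : String) (out : String) : Decidable (Spec_sanitize_variable_name prop out) := by unfold Spec_sanitize_variable_name; infer_instance

-- ===== CLAIM (what is proved, stated in full; the proofs are below) =====
def Claim_equal_sanitize_variable_name : Prop := ∀ (prop : String), Dom_sanitize_variable_name prop → Spec_sanitize_variable_name prop (sanitize_variable_name prop)

-- ===== LEMMAS AND PROOFS =====

-- the per-character map of B's loop body
def pvF (c : Char) : Char := if c = '-' ∨ c = '#' then '_' else c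

theorem replace_go_single (a b : Char) : ∀ (fuel : Nat) (l acc : List Char), l.length ≤ fuel →
    PySem.Chars.replace.go [a] [b] fuel l acc
      = acc.reverse ++ l.map (fun c => if c = a then b else c) := by
  intro fuel
  induction fuel with
  | zero =>
    intro l acc h
    have : l = [] := List.length_eq_zero_iff.mp (Nat.le_zero.mp h)
    subst this; simp [PySem.Chars.replace.go]
  | succ n ih =>
    intro l acc h
    cases l with
    | nil => simp [PySem.Chars.replace.go]
    | cons c rest =>
      simp only [PySem.Chars.replace.go]
      by_cases hp : [a].isPrefixOf (c :: rest) = true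
      · have hca : c = a := by
          simp [List.isPrefixOf] at hp; exact hp.symm
        simp only [hp, if_true]
        rw [show List.drop [a].length (c :: rest) = rest by simp]
        rw [ih rest _ (by simpa using Nat.le_of_succ_le_succ h)]
        simp [hca]
      · have hca : ¬ c = a := by
          intro hc; apply hp; simp [List.isPrefixOf, hc]
        simp only [hp]
        rw [ih rest _ (by simpa using Nat.le_of_succ_le_succ h)]
        simp [hca]

theorem replace_single (a b : Char) (l : List Char) :
    PySem.Chars.replace l [a] [b] = l.map (fun c => if c = a then b else c) := by
  unfold PySem.Chars.replace
  simp only [List.isEmpty_cons, Bool.false_eq_true, if_false]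
  rw [replace_go_single a b l.length l [] (le_refl _)]
  simp

-- takeWhile over l ++ [c] stops inside l when l contains ':'
theorem takeWhile_append_stop {l : List Char} (c : Char) (h : ':' ∈ l) :
    (l ++ [c]).takeWhile (fun x => x != ':') = l.takeWhile (fun x => x != ':') := by
  rw [List.takeWhile_append, if_neg]
  intro hlen
  have heq := (List.takeWhile_prefix (l := l) (fun x => x != ':')).eq_of_length hlen
  have hall := List.takeWhile_eq_self_iff.mp heq
  have := hall ':' h
  simp at this

-- the last element of splitOn is determined by the suffix after the last ':'
theorem splitOn_go_getLast : ∀ (fuel : Nat) (l cur : List Char) (acc : List (List Char)),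
    l.length < fuel →
    (PySem.Chars.splitOn.go [':'] fuel l cur acc).getLast? =
      some (if ':' ∈ l then (l.reverse.takeWhile (fun c => c != ':')).reverse
            else cur.reverse ++ l) := by
  intro fuel
  induction fuel with
  | zero => intro l cur acc h; omega
  | succ n ih =>
    intro l cur acc h
    cases l with
    | nil => simp [PySem.Chars.splitOn.go]
    | cons c rest =>
      simp only [PySem.Chars.splitOn.go]
      have hlen : rest.length < n := by simpa using Nat.lt_of_succ_lt_succ h
      have hrev : (c :: rest).reverse = rest.reverse ++ [c] := by simp
      by_cases hc : c = ':'
      · have hp : [':'].isPrefixOf (c :: rest) = true := by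
          simp [List.isPrefixOf, hc]
        simp only [hp, if_true]
        rw [show List.drop ([':'].length) (c :: rest) = rest by simp]
        rw [ih rest [] _ hlen]
        have hmem : ':' ∈ c :: rest := by simp [hc]
        rw [if_pos hmem]
        by_cases hr : ':' ∈ rest
        · rw [if_pos hr, hrev, takeWhile_append_stop c (List.mem_reverse.mpr hr)]
        · have hpos : ∀ a ∈ rest.reverse, (a != ':') = true := by
            intro a ha
            have : a ∈ rest := List.mem_reverse.mp ha
            simp
            intro ha'
            exact hr (ha' ▸ this)
          rw [if_neg hr, hrev, List.takeWhile_append_of_pos hpos]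
          subst hc
          simp
      · have hp : [':'].isPrefixOf (c :: rest) = false := by
          simp [List.isPrefixOf]; exact fun h' => hc h'.symm
        simp only [hp, Bool.false_eq_true, if_false]
        rw [ih rest (c :: cur) _ hlen]
        by_cases hr : ':' ∈ rest
        · have hmem : ':' ∈ c :: rest := List.mem_cons_of_mem _ hr
          rw [if_pos hr, if_pos hmem, hrev, takeWhile_append_stop c (List.mem_reverse.mpr hr)]
        · have hmem : ':' ∉ c :: rest := by
            intro hm
            rcases List.mem_cons.mp hm with hm | hm
            · exact hc hm.symm
            · exact hr hm
          rw [if_neg hr, if_neg hmem]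
          simp

theorem splitOn_getLast (s : List Char) :
    (PySem.Chars.splitOn s [':']).getLast? =
      some ((s.reverse.takeWhile (fun c => c != ':')).reverse) := by
  unfold PySem.Chars.splitOn
  rw [splitOn_go_getLast (s.length + 1) s [] [] (Nat.lt_succ_self _)]
  by_cases hs : ':' ∈ s
  · rw [if_pos hs]
  · rw [if_neg hs]
    have hall : s.reverse.takeWhile (fun x => x != ':') = s.reverse := by
      apply List.takeWhile_eq_self_iff.mpr
      intro x hx
      have : x ∈ s := List.mem_reverse.mp hx
      simp
      intro hx'
      exact hs (hx' ▸ this)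
    rw [hall]
    simp

-- B's loop computes the mapped takeWhile of its input
theorem pvRevCollect_eq : ∀ (l out : List Char),
    pvRevCollect l out = out ++ (l.takeWhile (fun c => c != ':')).map pvF := by
  intro l
  induction l with
  | nil => intro out; simp [pvRevCollect]
  | cons c rest ih =>
    intro out
    by_cases hc : c = ':'
    · simp [pvRevCollect, hc]
    · have hb : (c != ':') = true := by simp [hc]
      simp only [pvRevCollect, if_neg hc, List.takeWhile_cons, hb, if_true, List.map_cons]
      rw [ih]
      simp [pvF]

-- pyGet? xs (-1) is getLast? on a nonempty list
theorem pyGet_neg_one {α : Type} (xs : List α) (h : xs ≠ []) :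
    PySem.List.pyGet? xs (-1) = xs.getLast? := by
  have hlen : 1 ≤ xs.length := List.length_pos_iff.mpr h
  simp only [PySem.List.pyGet?, PySem.List.pyIdx?]
  rw [if_neg (by omega), if_pos (by omega)]
  simp only [Option.bind_some]
  rw [List.getLast?_eq_getElem?]
  norm_num

-- ===== VERDICT (by name: the statement is the Claim_ definition above) =====
theorem sanitize_variable_name_spec : Claim_equal_sanitize_variable_name := by
  intro prop _
  unfold Spec_sanitize_variable_name sanitize_variable_name sanitize_variable_name_alt
  have hne : PySem.Chars.splitOn prop.toList [':'] ≠ [] := by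
    intro h
    have := splitOn_getLast prop.toList
    rw [h] at this
    simp at this
  have hsplit : (PySem.Str.split? prop ":").getD []
      = (PySem.Chars.splitOn prop.toList [':']).map String.ofList := by
    simp [PySem.Str.split?, PySem.Chars.split?]
  set seg : List Char := (prop.toList.reverse.takeWhile (fun c => c != ':')).reverse with hseg
  have hparts : (PySem.Str.split? prop ":").getD [] ≠ [] := by
    rw [hsplit]; simpa using hne
  simp only [hparts, ne_eq, not_false_eq_true, if_true]
  have hlast : (PySem.List.pyGet? ((PySem.Str.split? prop ":").getD []) (-1)).getD ""
      = String.ofList seg := by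
    rw [hsplit, pyGet_neg_one _ (by simpa using hne)]
    rw [List.getLast?_map, splitOn_getLast prop.toList]
    rfl
  rw [hlast]
  simp only [List.foldl]
  apply String.toList_inj.mp
  rw [PySem.Str.toList_replace, PySem.Str.toList_replace, PySem.Str.toList_replace]
  have hd : ("-" : String).toList = ['-'] := by decide
  have hc : (":" : String).toList = [':'] := by decide
  have hh : ("#" : String).toList = ['#'] := by decide
  have hu : ("_" : String).toList = ['_'] := by decide
  rw [hd, hc, hh, hu]
  rw [replace_single, replace_single, replace_single]
  simp only [List.map_map]
  have hofl : (String.ofList seg).toList = seg := by simp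
  rw [hofl]
  rw [pvRevCollect_eq, List.nil_append]
  have hB : ((prop.toList.reverse.takeWhile (fun c => c != ':')).map pvF).reverse
      = seg.map pvF := by
    rw [hseg, List.map_reverse]
  rw [show (String.ofList ((prop.toList.reverse.takeWhile (fun c => c != ':')).map pvF).reverse).toList
        = ((prop.toList.reverse.takeWhile (fun c => c != ':')).map pvF).reverse by simp]
  rw [hB]
  apply List.map_congr_left
  intro c hcmem
  have hcne : c ≠ ':' := by
    have : c ∈ prop.toList.reverse.takeWhile (fun c => c != ':') := by
      rw [hseg] at hcmem
      exact List.mem_reverse.mp hcmem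
    have := List.mem_takeWhile_imp this
    simpa using this
  simp only [Function.comp_apply, pvF]
  by_cases h1 : c = '-' <;> by_cases h3 : c = '#' <;> simp [h1, h3, hcne]
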